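-- pv_equiv track=rewrite | github.com/wenkai-Y/Paper-Reproduce | 0x01_A New Encoding Algorithm for a Multidimensional Version of the Montgomery Ladder/optimized_d_mul.py | ChooseSeq
-- ===== SOURCE A (Python) =====
-- def ChooseSeq(d, a):
--     evens = []
--     odds  = []
--     for i in range(d):
--         if a[i] % 2 == 0:
--             evens.append(i+1)
--         else:
--             odds.append(i+1)
--     # 这里就不乱序了哈
--     return odds + evens
-- ===== SOURCE B (Python) =====
-- def ChooseSeq(d, a):
--     # One stable sort keyed on parity: odds (key False) come first, evens after,
--     # each keeping the original index order.
--     return sorted(range(1, d + 1), key=lambda i: a[i - 1] % 2 == 0)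
-- ===== Notes on version B (the rewrite author's own statement) =====
-- stated objective: alternative
-- what changed: Replaced the two-bucket append loop by a single stable sort of the 1-based indices keyed on parity of a[i-1] (False=odd before True=even), with no explicit bucket lists.
import Mathlib
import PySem

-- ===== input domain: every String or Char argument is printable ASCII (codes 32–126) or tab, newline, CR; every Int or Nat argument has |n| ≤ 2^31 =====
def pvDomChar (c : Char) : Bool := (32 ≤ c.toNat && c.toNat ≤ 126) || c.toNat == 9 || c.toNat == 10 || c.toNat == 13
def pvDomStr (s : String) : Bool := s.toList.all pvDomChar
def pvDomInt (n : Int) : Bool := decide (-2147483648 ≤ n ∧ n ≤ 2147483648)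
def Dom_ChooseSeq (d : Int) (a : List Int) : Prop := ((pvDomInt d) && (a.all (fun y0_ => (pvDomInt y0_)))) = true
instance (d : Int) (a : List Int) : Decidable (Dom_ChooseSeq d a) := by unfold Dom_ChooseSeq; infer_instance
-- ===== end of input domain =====

-- B replaces A's two-bucket append loop by one stable sort of the 1-based indices keyed on parity (alternative decomposition, no speed claim).

-- ===== PORT A =====
def ChooseSeq (d : Int) (a : List Int) : List Int :=
  let p := (PySem.List.pyRange 0 d 1).foldl
    (fun (p : List Int × List Int) i =>
      if PySem.Int.mod (PySem.List.pyGetD a i 0) 2 = 0 then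
        (p.1 ++ [i + 1], p.2)          -- evens.append(i+1)
      else
        (p.1, p.2 ++ [i + 1]))         -- odds.append(i+1)
    ([], [])
  p.2 ++ p.1                           -- odds + evens

-- ===== PORT B =====
def ChooseSeq_alt (d : Int) (a : List Int) : List Int :=
  PySem.List.sorted (PySem.List.pyRange 1 (d + 1) 1)
    (fun i => decide (PySem.Int.mod (PySem.List.pyGetD a (i - 1) 0) 2 = 0)) false

-- ===== PRECONDITION & SPEC =====
-- Pre_ excludes exactly the inputs where Python's a[i] raises IndexError (d > len(a)); B raises there too.
def Pre_ChooseSeq (d : Int) (a : List Int) : Prop := d ≤ (a.length : Int)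
instance (d : Int) (a : List Int) : Decidable (Pre_ChooseSeq d a) := by unfold Pre_ChooseSeq; infer_instance
def pvWitness_ChooseSeq : Int × List Int := (4, [3, 4, 5, 6])

def Spec_ChooseSeq (d : Int) (a : List Int) (out : List Int) : Prop := out = ChooseSeq_alt d a
instance (d : Int) (a : List Int) (out : List Int) : Decidable (Spec_ChooseSeq d a out) := by unfold Spec_ChooseSeq; infer_instance

-- ===== CLAIM (what is proved, stated in full; the proofs are below) =====
def Claim_equal_ChooseSeq : Prop := ∀ (d : Int) (a : List Int), Dom_ChooseSeq d a → Pre_ChooseSeq d a → Spec_ChooseSeq d a (ChooseSeq d a)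

-- ===== LEMMAS AND PROOFS =====

-- inserting into an all-false-keys ++ all-true-keys list keeps the partition shape
theorem insertBy_all_true (key : Int → Bool) (x : Int) (E : List Int)
    (hE : ∀ y ∈ E, key y = true) :
    PySem.List.insertBy (fun a b => decide (key a < key b)) x E =
      if key x then E ++ [x] else x :: E := by
  induction E with
  | nil => cases h : key x <;> simp [PySem.List.insertBy]
  | cons y ys ih =>
    have hy : key y = true := hE y (by simp)
    cases h : key x with
    | false =>
      simp [PySem.List.insertBy, hy, h]
    | true =>
      simp [PySem.List.insertBy, hy, h,
        ih (fun z hz => hE z (by simp [hz]))]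

theorem insertBy_partition (key : Int → Bool) (x : Int) (O E : List Int)
    (hO : ∀ y ∈ O, key y = false) (hE : ∀ y ∈ E, key y = true) :
    PySem.List.insertBy (fun a b => decide (key a < key b)) x (O ++ E) =
      if key x then O ++ E ++ [x] else O ++ x :: E := by
  induction O with
  | nil => simpa using insertBy_all_true key x E hE
  | cons y ys ih =>
    have hy : key y = false := hO y (by simp)
    have := ih (fun z hz => hO z (by simp [hz]))
    cases h : key x <;>
      simp_all [PySem.List.insertBy]

theorem foldl_insertBy_partition (key : Int → Bool) (xs : List Int) :
    ∀ (O E : List Int), (∀ y ∈ O, key y = false) → (∀ y ∈ E, key y = true) →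
    xs.foldl (fun acc x => PySem.List.insertBy (fun a b => decide (key a < key b)) x acc) (O ++ E) =
      (O ++ xs.filter (fun x => !key x)) ++ (E ++ xs.filter (fun x => key x)) := by
  induction xs with
  | nil => intro O E _ _; simp
  | cons x xs ih =>
    intro O E hO hE
    rw [List.foldl_cons, insertBy_partition key x O E hO hE]
    cases h : key x with
    | false =>
      have hO' : ∀ y ∈ O ++ [x], key y = false := by
        intro y hy
        rcases List.mem_append.1 hy with h' | h'
        · exact hO y h'
        · simp at h'; simpa [h'] using h
      have e1 : O ++ x :: E = (O ++ [x]) ++ E := by simp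
      rw [if_neg (by simp), e1, ih (O ++ [x]) E hO' hE]
      simp [h]
    | true =>
      have hE' : ∀ y ∈ E ++ [x], key y = true := by
        intro y hy
        rcases List.mem_append.1 hy with h' | h'
        · exact hE y h'
        · simp at h'; simpa [h'] using h
      have e1 : O ++ E ++ [x] = O ++ (E ++ [x]) := by simp
      rw [if_pos rfl, e1, ih O (E ++ [x]) hO hE']
      simp [h]

-- a stable sort on a Bool key is exactly "falses (in order) ++ trues (in order)"
theorem sorted_bool_key (key : Int → Bool) (xs : List Int) :
    PySem.List.sorted xs key false =
      xs.filter (fun x => !key x) ++ xs.filter (fun x => key x) := by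
  rw [PySem.List.sorted_eq_foldl_insertBy]
  simpa using foldl_insertBy_partition key xs [] [] (by simp) (by simp)

-- A's bucket loop is two filters
theorem foldl_buckets (p : Int → Prop) [DecidablePred p] (f : Int → Int) (xs : List Int) :
    ∀ (E O : List Int),
    xs.foldl (fun (q : List Int × List Int) i =>
        if p i then (q.1 ++ [f i], q.2) else (q.1, q.2 ++ [f i])) (E, O) =
      (E ++ (xs.filter (fun i => decide (p i))).map f,
       O ++ (xs.filter (fun i => !decide (p i))).map f) := by
  induction xs with
  | nil => intro E O; simp
  | cons x xs ih =>
    intro E O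
    by_cases h : p x <;> simp [h, ih, List.append_assoc]

theorem pyRange_shift (d : Int) :
    PySem.List.pyRange 1 (d + 1) 1 = (PySem.List.pyRange 0 d 1).map (fun i => i + 1) := by
  rw [PySem.List.pyRange_one, PySem.List.pyRange_one]
  have : (d + 1 - 1).toNat = (d - 0).toNat := by omega
  rw [this, List.map_map]
  exact List.map_congr_left (fun k _ => by simp; ring)

-- ===== VERDICT (by name: the statement is the Claim_ definition above) =====
theorem ChooseSeq_spec : Claim_equal_ChooseSeq := by
  intro d a _ _
  unfold Spec_ChooseSeq ChooseSeq ChooseSeq_alt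
  rw [pyRange_shift,
    sorted_bool_key (fun i => decide (PySem.Int.mod (PySem.List.pyGetD a (i - 1) 0) 2 = 0)),
    List.filter_map, List.filter_map,
    foldl_buckets (fun i => PySem.Int.mod (PySem.List.pyGetD a i 0) 2 = 0) (fun i => i + 1)
      (PySem.List.pyRange 0 d 1) [] []]
  simp only [Function.comp_def]
  rw [List.filter_congr (l := PySem.List.pyRange 0 d 1)
        (p := fun i => !decide (PySem.Int.mod (PySem.List.pyGetD a (i + 1 - 1) 0) 2 = 0))
        (q := fun i => !decide (PySem.Int.mod (PySem.List.pyGetD a i 0) 2 = 0))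
        (fun i _ => by simp),
      List.filter_congr (l := PySem.List.pyRange 0 d 1)
        (p := fun i => decide (PySem.Int.mod (PySem.List.pyGetD a (i + 1 - 1) 0) 2 = 0))
        (q := fun i => decide (PySem.Int.mod (PySem.List.pyGetD a i 0) 2 = 0))
        (fun i _ => by simp)]
  simp
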